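-- pv_equiv track=rewrite | github.com/ill-birdie/AdventOfCode | src/2025/Day06.py | init_grid2
-- ===== SOURCE A (Python) =====
-- from typing import List
--
-- def init_grid2(grid: list) -> List[List[int]]:
--     new_grid = []
--     longest_len = 0
--     curr_len = len(grid[0])
--     for l in grid[1:]:
--         if curr_len > longest_len:
--             longest_len = curr_len
--         curr_len = len(l)
--
--     operation_list = []
--     oper = ''
--     for col_idx in range(longest_len + 1):
--         num = ''
--         for row_idx, row in enumerate(grid[:-1]):
--             if col_idx < len(row):
--                 num += row[col_idx]
--             else:
--                 num += ' '
--         if col_idx < len(grid[-1]):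
--             potential_oper = grid[-1][col_idx]
--             if potential_oper != ' ':
--                 oper = potential_oper
--         num = num.strip()
--         if num.isdigit():
--             operation_list.append(num)
--         else:
--             operation_list.append(oper)
--             new_grid.append(operation_list)
--             operation_list = []
--     return new_grid
-- ===== SOURCE B (Python) =====
-- def init_grid2(grid: list):
--     body = grid[:-1]
--     last = grid[-1]
--     longest_len = max((len(r) for r in body), default=0)
--     # transpose the number rows once, row-major, padding short rows with spaces
--     col_bufs = [[] for _ in range(longest_len)]
--     for r in body:
--         padded = r + ' ' * (longest_len - len(r))
--         for i, ch in enumerate(padded):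
--             col_bufs[i].append(ch)
--     cols = [''.join(buf) for buf in col_bufs]
--     new_grid = []
--     group = []
--     oper = ''
--     for i in range(longest_len + 1):
--         num = cols[i].strip() if i < longest_len else ''
--         if i < len(last) and last[i] != ' ':
--             oper = last[i]
--         if num.isdigit():
--             group.append(num)
--         else:
--             group.append(oper)
--             new_grid.append(group)
--             group = []
--     return new_grid
-- ===== Notes on version B (the rewrite author's own statement) =====
-- stated objective: alternative
-- what changed: B replaces A's lagging running-max loop and A's per-column index-checked rescan of every row with a max() over the non-last rows and a single row-major transpose pass that builds all padded column strings up front, then one flat loop over the columns.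
-- outside the precondition, e.g. on init_grid2([]): A raises IndexError, B raises IndexError
import Mathlib
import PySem

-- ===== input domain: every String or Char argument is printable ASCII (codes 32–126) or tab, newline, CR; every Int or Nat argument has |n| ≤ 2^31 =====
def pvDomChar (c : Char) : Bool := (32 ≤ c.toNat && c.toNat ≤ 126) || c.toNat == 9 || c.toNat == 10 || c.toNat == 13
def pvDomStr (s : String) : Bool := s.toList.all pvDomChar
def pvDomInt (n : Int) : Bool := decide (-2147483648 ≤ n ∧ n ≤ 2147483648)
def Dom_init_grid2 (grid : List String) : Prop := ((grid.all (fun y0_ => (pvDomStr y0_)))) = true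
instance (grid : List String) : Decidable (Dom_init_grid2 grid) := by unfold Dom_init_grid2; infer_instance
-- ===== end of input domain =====

-- B builds the column strings once by a row-major transpose pass over the rows instead of
-- A's per-column index-checked rescan of all rows; objective: alternative decomposition.

-- ===== PORT A =====
-- step of A's outer loop; state = (new_grid, operation_list, oper); num recomputed per column
def initGrid2StepA (body : List String) (last : List Char)
    (st : List (List String) × List String × List Char) (col : Nat) :
    List (List String) × List String × List Char :=
  let num : List Char :=
    body.foldl (fun acc row =>
      if col < row.toList.length then acc ++ [row.toList.getD col ' '] else acc ++ [' ']) []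
  let oper := if col < last.length then
      (let potential := last.getD col ' '
       if potential ≠ ' ' then [potential] else st.2.2)
    else st.2.2
  let num := PySem.Chars.strip num
  if PySem.Chars.strIsdigit num then
    (st.1, st.2.1 ++ [String.ofList num], oper)
  else
    (st.1 ++ [st.2.1 ++ [String.ofList oper]], [], oper)

def init_grid2 (grid : List String) : List (List String) :=
  match grid with
  | [] => []   -- Python raises IndexError on grid[0]; excluded by Pre_
  | g0 :: rest =>
    -- lagging max loop over grid[1:]
    let longest_len := (rest.foldl
      (fun (st : Nat × Nat) l =>
        ((if st.2 > st.1 then st.2 else st.1), l.toList.length))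
      (0, g0.toList.length)).1
    let body := (g0 :: rest).dropLast
    let last := ((g0 :: rest).getLast (by simp)).toList
    ((List.range (longest_len + 1)).foldl (initGrid2StepA body last) ([], [], [])).1

-- ===== PORT B =====
-- step of B's loop; cols is the precomputed transpose
def initGrid2StepB (cols : List (List Char)) (last : List Char) (longest_len : Nat)
    (st : List (List String) × List String × List Char) (i : Nat) :
    List (List String) × List String × List Char :=
  let num := if i < longest_len then PySem.Chars.strip (cols.getD i []) else []
  let oper := if i < last.length ∧ last.getD i ' ' ≠ ' ' then [last.getD i ' '] else st.2.2
  if PySem.Chars.strIsdigit num then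
    (st.1, st.2.1 ++ [String.ofList num], oper)
  else
    (st.1 ++ [st.2.1 ++ [String.ofList oper]], [], oper)

def init_grid2_alt (grid : List String) : List (List String) :=
  match grid with
  | [] => []   -- excluded by Pre_ (Python A raises there; B also indexes grid[-1])
  | _ =>
    let body := grid.dropLast
    let last := (grid.getLast?.getD "").toList
    let longest_len := (body.map (fun r => r.toList.length)).foldl max 0
    -- one pass over the rows: col_bufs[i].append(padded[i]) for every i (zipWith is that
    -- write-back; List Char is both the buffer and its ''.join)
    let cols := body.foldl
      (fun (cols : List (List Char)) r =>
        List.zipWith (fun c ch => c ++ [ch])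
          cols (r.toList ++ List.replicate (longest_len - r.toList.length) ' '))
      (List.replicate longest_len [])
    ((List.range (longest_len + 1)).foldl (initGrid2StepB cols last longest_len) ([], [], [])).1

-- ===== PRECONDITION & SPEC =====
-- Python A raises IndexError on the empty list (grid[0]); those inputs are excluded.
def Pre_init_grid2 (grid : List String) : Prop := grid ≠ []
instance (grid : List String) : Decidable (Pre_init_grid2 grid) := by unfold Pre_init_grid2; infer_instance
def pvWitness_init_grid2 : List String := ["12 34", " 5  6", "+  * "]
def Spec_init_grid2 (grid : List String) (out : List (List String)) : Prop := out = init_grid2_alt grid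
instance (grid : List String) (out : List (List String)) : Decidable (Spec_init_grid2 grid out) := by unfold Spec_init_grid2; infer_instance

-- ===== CLAIM (what is proved, stated in full; the proofs are below) =====
def Claim_equal_init_grid2 : Prop := ∀ (grid : List String), Dom_init_grid2 grid → Pre_init_grid2 grid → Spec_init_grid2 grid (init_grid2 grid)

-- ===== LEMMAS AND PROOFS =====

-- the character A reads for column `col` of row `row` (out-of-range = the padding space)
def colChar (col : Nat) (row : String) : Char := row.toList.getD col ' '

-- A's lagging max loop computes the max over all but the last length
theorem lag_loop (rest : List String) (acc c : Nat) :
    (rest.foldl (fun (st : Nat × Nat) l =>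
        ((if st.2 > st.1 then st.2 else st.1), l.toList.length)) (acc, c)).1
    = ((c :: rest.map (fun l => l.toList.length)).dropLast).foldl
        (fun a b => if b > a then b else a) acc := by
  induction rest generalizing acc c with
  | nil => simp
  | cons l ls ih =>
    simp only [List.foldl_cons, List.map_cons, List.dropLast_cons₂]
    exact ih (if c > acc then c else acc) l.toList.length

theorem foldl_if_max (l : List Nat) (c : Nat) :
    l.foldl (fun a b => if b > a then b else a) c = l.foldl max c := by
  induction l generalizing c with
  | nil => rfl
  | cons a l ih =>
    simp only [List.foldl_cons]
    rw [show (if a > c then a else c) = max c a by split_ifs <;> omega]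
    exact ih _

theorem init_le_foldl_max (l : List Nat) (c : Nat) : c ≤ l.foldl max c := by
  induction l generalizing c with
  | nil => simp
  | cons a l ih => exact le_trans (Nat.le_max_left c a) (ih _)

theorem mem_le_foldl_max (l : List Nat) (c x : Nat) (hx : x ∈ l) : x ≤ l.foldl max c := by
  induction l generalizing c with
  | nil => simp at hx
  | cons a l ih =>
    rcases List.mem_cons.mp hx with rfl | h
    · exact le_trans (Nat.le_max_right c x) (init_le_foldl_max _ _)
    · exact ih _ h

-- A's inner per-column loop is the map of colChar over the rows
theorem numA_map (body : List String) (col : Nat) (init : List Char) :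
    body.foldl (fun acc row =>
        if col < row.toList.length then acc ++ [row.toList.getD col ' '] else acc ++ [' ']) init
    = init ++ body.map (colChar col) := by
  induction body generalizing init with
  | nil => simp
  | cons r rs ih =>
    simp only [List.foldl_cons, List.map_cons]
    by_cases h : col < r.toList.length
    · rw [if_pos h, ih]; simp [colChar]
    · rw [if_neg h, ih]
      simp [colChar, List.getElem?_eq_none (Nat.le_of_not_lt h)]

theorem pad_get (r : List Char) (L j : Nat) (_hj : j < L)
    (h : j < (r ++ List.replicate (L - r.length) ' ').length) :
    (r ++ List.replicate (L - r.length) ' ')[j] = r.getD j ' ' := by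
  by_cases hr : j < r.length
  · rw [List.getElem_append_left hr, List.getD_eq_getElem _ _ hr]
  · rw [List.getElem_append_right (Nat.le_of_not_lt hr), List.getElem_replicate,
      List.getD_eq_default _ _ (Nat.le_of_not_lt hr)]

-- the row-major fold builds exactly the list of columns
theorem cols_fold (L : Nat) (body pre : List String) :
    body.foldl
      (fun (cols : List (List Char)) r =>
        List.zipWith (fun c ch => c ++ [ch])
          cols (r.toList ++ List.replicate (L - r.toList.length) ' '))
      ((List.range L).map (fun j => pre.map (colChar j)))
    = (List.range L).map (fun j => (pre ++ body).map (colChar j)) := by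
  induction body generalizing pre with
  | nil => simp
  | cons r rs ih =>
    simp only [List.foldl_cons]
    have hstep : List.zipWith (fun c ch => c ++ [ch])
        ((List.range L).map (fun j => pre.map (colChar j)))
        (r.toList ++ List.replicate (L - r.toList.length) ' ')
        = (List.range L).map (fun j => (pre ++ [r]).map (colChar j)) := by
      apply List.ext_getElem
      · simp; omega
      · intro j h1 h2
        have hjL : j < L := by simpa using h2
        rw [List.getElem_zipWith]
        simp only [List.getElem_map, List.getElem_range]
        rw [pad_get _ _ _ hjL]
        simp [colChar]
    rw [hstep, ih (pre ++ [r])]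
    simp

theorem strip_spaces (n : Nat) : PySem.Chars.strip (List.replicate n ' ') = [] := by
  have h : PySem.Chars.isspace ' ' = true := by decide
  simp [PySem.Chars.strip, PySem.Chars.lstrip, PySem.Chars.rstrip, h]

theorem steps_agree (L : Nat) (body : List String) (last : List Char)
    (hmax : ∀ r ∈ body, r.toList.length ≤ L)
    (st : List (List String) × List String × List Char) (col : Nat)
    (hcol : col ∈ List.range (L + 1)) :
    initGrid2StepA body last st col
    = initGrid2StepB ((List.range L).map (fun j => body.map (colChar j))) last L st col := by
  have hc : col < L + 1 := List.mem_range.mp hcol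
  unfold initGrid2StepA initGrid2StepB
  have hnum : PySem.Chars.strip (body.foldl (fun acc row =>
        if col < row.toList.length then acc ++ [row.toList.getD col ' '] else acc ++ [' ']) [])
      = if col < L then
          PySem.Chars.strip (((List.range L).map (fun j => body.map (colChar j))).getD col [])
        else [] := by
    rw [numA_map, List.nil_append]
    by_cases h : col < L
    · rw [if_pos h, List.getD_eq_getElem _ _ (by simpa using h), List.getElem_map,
        List.getElem_range]
    · rw [if_neg h]
      have hcc : ∀ r ∈ body, colChar col r = ' ' := fun r hr =>
        List.getD_eq_default _ _ (le_trans (hmax r hr) (Nat.le_of_not_lt h))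
      rw [List.map_congr_left (g := fun _ => ' ') hcc, List.map_const', strip_spaces]
  simp only [hnum]
  have hoper : (if col < last.length then
      (let potential := last.getD col ' '
       if potential ≠ ' ' then [potential] else st.2.2)
    else st.2.2)
    = if col < last.length ∧ last.getD col ' ' ≠ ' ' then [last.getD col ' '] else st.2.2 := by
    by_cases h1 : col < last.length
    · by_cases h2 : last.getD col ' ' ≠ ' '
      · rw [if_pos h1, if_pos h2, if_pos ⟨h1, h2⟩]
      · rw [if_pos h1]
        simp only [ne_eq, Decidable.not_not] at h2
        rw [if_neg (fun hcon => hcon h2), if_neg (fun hcon => hcon.2 h2)]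
    · simp [h1]
  simp only [hoper]

-- ===== VERDICT (by name: the statement is the Claim_ definition above) =====
theorem init_grid2_spec : Claim_equal_init_grid2 := by
  intro grid _ hpre
  unfold Spec_init_grid2
  match grid with
  | [] => exact absurd rfl hpre
  | g0 :: rest =>
    simp only [init_grid2, init_grid2_alt]
    -- identify the two longest_len computations
    have hlen : (rest.foldl
        (fun (st : Nat × Nat) l =>
          ((if st.2 > st.1 then st.2 else st.1), l.toList.length))
        (0, g0.toList.length)).1
        = ((g0 :: rest).dropLast.map (fun r => r.toList.length)).foldl max 0 := by
      rw [lag_loop]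
      have hmc : g0.toList.length :: List.map (fun l => l.toList.length) rest
          = List.map (fun l => l.toList.length) (g0 :: rest) := rfl
      rw [hmc, ← List.map_dropLast, foldl_if_max]
    set L := ((g0 :: rest).dropLast.map (fun r => r.toList.length)).foldl max 0 with hL
    rw [hlen]
    -- identify the two `last` values
    have hlast : ((g0 :: rest).getLast?.getD "") = (g0 :: rest).getLast (by simp) := by
      rw [List.getLast?_eq_some_getLast (l := g0 :: rest) (by simp)]; rfl
    rw [hlast]
    -- identify B's cols with the transpose
    have hcols : (g0 :: rest).dropLast.foldl
        (fun (cols : List (List Char)) r =>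
          List.zipWith (fun c ch => c ++ [ch])
            cols (r.toList ++ List.replicate (L - r.toList.length) ' '))
        (List.replicate L [])
        = (List.range L).map (fun j => (g0 :: rest).dropLast.map (colChar j)) := by
      have h0 : (List.replicate L ([] : List Char))
          = (List.range L).map (fun j => ([] : List String).map (colChar j)) := by
        simp [List.map_const']
      rw [h0, cols_fold L _ []]
      simp
    rw [hcols]
    -- the two folds agree step by step
    have hmax : ∀ r ∈ (g0 :: rest).dropLast, r.toList.length ≤ L := by
      intro r hr
      exact mem_le_foldl_max _ _ _ (List.mem_map.mpr ⟨r, hr, rfl⟩)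
    exact congrArg Prod.fst
      (PySem.List.foldl_congr_mem _ _ _ _
        (fun st col hcol => steps_agree L _ _ hmax st col hcol))
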